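-- pv_equiv track=rewrite | github.com/huseyinardaarslan/LawRagBot | setup_pinecone.py | _find_page_for_chunk
-- ===== SOURCE A (Python) =====
-- from typing import List, Dict, Any, Optional, Tuple
--
-- def _find_page_for_chunk(chunk: str, page_texts: List[Tuple[int, str]]) -> int:
--     """Find which page a chunk primarily belongs to"""
--     max_overlap = 0
--     best_page = 1
--
--     for page_num, page_text in page_texts:
--         overlap = len(set(chunk.split()) & set(page_text.split()))
--         if overlap > max_overlap:
--             max_overlap = overlap
--             best_page = page_num
--
--     return best_page
-- ===== SOURCE B (Python) =====
-- def _find_page_for_chunk(chunk, page_texts):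
--     """Find which page a chunk primarily belongs to (inverted-index re-implementation).
--
--     Builds an inverted index word -> page positions once, then counts overlaps
--     by iterating only over the chunk's distinct words, instead of recomputing
--     the chunk's word set and intersecting it with every page.
--     """
--     inv = {}
--     for i, (_, text) in enumerate(page_texts):
--         for w in dict.fromkeys(text.split()):
--             inv[w] = inv.get(w, []) + [i]
--
--     counts = {}
--     for w in dict.fromkeys(chunk.split()):
--         for i in inv.get(w, []):
--             counts[i] = counts.get(i, 0) + 1
--
--     max_overlap = 0
--     best_page = 1
--     for i, (page_num, _) in enumerate(page_texts):
--         c = counts.get(i, 0)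
--         if c > max_overlap:
--             max_overlap = c
--             best_page = page_num
--     return best_page
-- ===== Notes on version B (the rewrite author's own statement) =====
-- stated objective: faster
-- what changed: Replaced A's loop that rebuilds the chunk's word set and intersects it with each page's word set by an inverted index (word -> page positions) plus an overlap counter driven by the chunk's distinct words, keeping A's strict-> original-order selection with default page 1.
import Mathlib
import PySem

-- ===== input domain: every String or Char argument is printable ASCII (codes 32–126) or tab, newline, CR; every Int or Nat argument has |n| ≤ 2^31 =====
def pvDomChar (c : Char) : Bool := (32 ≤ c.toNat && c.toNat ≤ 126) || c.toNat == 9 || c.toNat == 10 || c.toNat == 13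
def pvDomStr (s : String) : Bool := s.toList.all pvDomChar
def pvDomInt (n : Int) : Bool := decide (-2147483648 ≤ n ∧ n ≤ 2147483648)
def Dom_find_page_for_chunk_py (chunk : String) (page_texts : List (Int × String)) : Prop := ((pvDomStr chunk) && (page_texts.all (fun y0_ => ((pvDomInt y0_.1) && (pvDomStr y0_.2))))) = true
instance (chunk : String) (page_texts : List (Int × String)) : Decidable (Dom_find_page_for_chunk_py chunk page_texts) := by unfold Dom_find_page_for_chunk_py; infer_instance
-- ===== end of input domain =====

-- B replaces A's per-page set intersection (which rebuilds the chunk's word set for every page)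
-- by an inverted index word → page positions, counting overlaps from the chunk's distinct words.

-- ===== PORT A =====
def find_page_for_chunk_py (chunk : String) (page_texts : List (Int × String)) : Int :=
  (page_texts.foldl
    (fun acc p =>
      let overlap : Int :=
        PySem.Set.len (PySem.Set.inter (PySem.Set.ofList (PySem.Str.split₀ chunk))
                                       (PySem.Set.ofList (PySem.Str.split₀ p.2)))
      if overlap > acc.1 then (overlap, p.1) else acc)
    ((0 : Int), (1 : Int))).2

-- ===== PORT B =====
def find_page_for_chunk_py_alt (chunk : String) (page_texts : List (Int × String)) : Int :=
  let inv : PySem.Dict String (List Int) :=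
    (PySem.List.enumerate page_texts).foldl
      (fun d q =>
        (PySem.List.dedup (PySem.Str.split₀ q.2.2)).foldl
          (fun d w => d.modify w [] (fun l => l ++ [q.1])) d)
      PySem.Dict.empty
  let counts : PySem.Dict Int Int :=
    (PySem.List.dedup (PySem.Str.split₀ chunk)).foldl
      (fun c w => (inv.getD w []).foldl (fun c i => c.modify i 0 (fun n => n + 1)) c)
      PySem.Dict.empty
  ((PySem.List.enumerate page_texts).foldl
    (fun acc q =>
      let c := counts.getD q.1 0
      if c > acc.1 then (c, q.2.1) else acc)
    ((0 : Int), (1 : Int))).2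

-- ===== PRECONDITION & SPEC =====
def Spec_find_page_for_chunk_py (chunk : String) (page_texts : List (Int × String)) (out : Int) : Prop := out = find_page_for_chunk_py_alt chunk page_texts
instance (chunk : String) (page_texts : List (Int × String)) (out : Int) : Decidable (Spec_find_page_for_chunk_py chunk page_texts out) := by unfold Spec_find_page_for_chunk_py; infer_instance

-- ===== CLAIM (what is proved, stated in full; the proofs are below) =====
def Claim_equal_find_page_for_chunk_py : Prop := ∀ (chunk : String) (page_texts : List (Int × String)), Dom_find_page_for_chunk_py chunk page_texts → Spec_find_page_for_chunk_py chunk page_texts (find_page_for_chunk_py chunk page_texts)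

-- ===== LEMMAS AND PROOFS =====

-- A's per-page overlap value
def pvOv (chunk : String) (p : Int × String) : Int :=
  PySem.Set.len (PySem.Set.inter (PySem.Set.ofList (PySem.Str.split₀ chunk))
                                 (PySem.Set.ofList (PySem.Str.split₀ p.2)))

-- B's inverted index and counter, named for the proofs (definitionally the ports' folds)
def pvInv (page_texts : List (Int × String)) : PySem.Dict String (List Int) :=
  (PySem.List.enumerate page_texts).foldl
    (fun d q =>
      (PySem.List.dedup (PySem.Str.split₀ q.2.2)).foldl
        (fun d w => d.modify w [] (fun l => l ++ [q.1])) d)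
    PySem.Dict.empty

def pvCounts (chunk : String) (page_texts : List (Int × String)) : PySem.Dict Int Int :=
  (PySem.List.dedup (PySem.Str.split₀ chunk)).foldl
    (fun c w => ((pvInv page_texts).getD w []).foldl (fun c i => c.modify i 0 (fun n => n + 1)) c)
    PySem.Dict.empty

theorem pv_a_eq (chunk : String) (page_texts : List (Int × String)) :
    find_page_for_chunk_py chunk page_texts
    = (page_texts.foldl
        (fun acc p => if pvOv chunk p > acc.1 then (pvOv chunk p, p.1) else acc)
        ((0 : Int), (1 : Int))).2 := rfl

theorem pv_alt_eq (chunk : String) (page_texts : List (Int × String)) :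
    find_page_for_chunk_py_alt chunk page_texts
    = ((PySem.List.enumerate page_texts).foldl
        (fun acc q =>
          let c := (pvCounts chunk page_texts).getD q.1 0
          if c > acc.1 then (c, q.2.1) else acc)
        ((0 : Int), (1 : Int))).2 := rfl

-- the word/position pairs B's inverted-index loop inserts, flattened
def pvPairs (page_texts : List (Int × String)) (s : Int) : List (String × Int) :=
  (PySem.List.enumerate page_texts s).flatMap
    (fun q => (PySem.List.dedup (PySem.Str.split₀ q.2.2)).map (fun w => (w, q.1)))

-- one inverted-index block: the positions the page at position s contributes for word w
theorem pv_block (ws : List String) (w : String) (s : Int) :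
    ((((PySem.List.dedup ws).map (fun w' => ((w', s) : String × Int))).filter
        (fun p => p.1 == w)).map (fun p => p.2))
    = if w ∈ ws then [s] else [] := by
  rw [List.filter_map]
  have hc : ((fun (p : String × Int) => p.1 == w) ∘ (fun w' => ((w', s) : String × Int)))
      = fun w' => w' == w := rfl
  rw [hc, List.filter_beq, List.map_map]
  by_cases h : w ∈ ws
  · rw [List.count_eq_one_of_mem (PySem.List.nodup_dedup ws) ((PySem.List.mem_dedup ws w).mpr h)]
    simp [h]
  · rw [List.count_eq_zero_of_not_mem (fun hc => h ((PySem.List.mem_dedup ws w).mp hc))]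
    simp [h]

-- set membership test on a Python set built from a list
theorem pv_contains_ofList (l : List String) (x : String) :
    (PySem.Set.ofList l).contains x = decide (x ∈ l) := by
  by_cases h : x ∈ l
  · rw [(PySem.Set.contains_iff _ _).mpr ((PySem.Set.mem_ofList l x).mpr h)]
    simp [h]
  · have hn : (PySem.Set.ofList l).contains x = false := by
      have := fun hc => h ((PySem.Set.mem_ofList l x).mp ((PySem.Set.contains_iff _ _).mp hc))
      simpa [Bool.not_eq_true] using this
    rw [hn]
    simp [h]

-- B's inverted index is the flat modify-loop over pvPairs
theorem pv_inv_eq (page_texts : List (Int × String)) :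
    pvInv page_texts
    = (pvPairs page_texts 0).foldl
        (fun d p => d.modify p.1 [] (fun l => l ++ [p.2])) PySem.Dict.empty := by
  unfold pvInv pvPairs
  rw [List.foldl_flatMap]
  simp only [List.foldl_map]

-- inv[w] lists exactly the positions of pages containing w, in order
theorem pv_inv_getD (page_texts : List (Int × String)) (s : Int) (w : String) :
    ((pvPairs page_texts s).foldl
        (fun d p => d.modify p.1 [] (fun l => l ++ [p.2])) PySem.Dict.empty).getD w []
    = ((PySem.List.enumerate page_texts s).filter
        (fun q => decide (w ∈ PySem.Str.split₀ q.2.2))).map (fun q => q.1) := by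
  rw [PySem.Dict.getD_foldl_modify_append, PySem.Dict.getD_empty, List.nil_append]
  unfold pvPairs
  induction page_texts generalizing s with
  | nil => simp [PySem.List.enumerate_nil]
  | cons x tl ih =>
    rw [PySem.List.enumerate_cons]
    simp only [List.flatMap_cons, List.filter_append, List.map_append, List.filter_cons]
    rw [ih (s + 1), pv_block]
    by_cases h : w ∈ PySem.Str.split₀ x.2 <;> simp [h]

theorem pv_counts_getD (inv : PySem.Dict String (List Int)) (cs : List String)
    (c : PySem.Dict Int Int) (j : Int) :
    ((cs.foldl (fun c w => (inv.getD w []).foldl (fun c i => c.modify i 0 (fun n => n + 1)) c) c).getD j 0)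
    = c.getD j 0 + (cs.map (fun w => ((inv.getD w []).count j : Int))).sum := by
  induction cs generalizing c with
  | nil => simp
  | cons w t ih =>
    simp only [List.foldl_cons, List.map_cons, List.sum_cons, ih,
      PySem.Dict.getD_foldl_modify_add_one]
    ring

-- count of position j in inv[w], for (j, p) an element of the enumeration
theorem pv_count_indicator (page_texts : List (Int × String)) (w : String)
    (k : Nat) (hk : k < page_texts.length) :
    (((PySem.List.enumerate page_texts).filter
        (fun q => decide (w ∈ PySem.Str.split₀ q.2.2))).map (fun q => q.1)).count ((k : Int))
    = if w ∈ PySem.Str.split₀ page_texts[k].2 then 1 else 0 := by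
  have hpw : ((((PySem.List.enumerate page_texts).filter
      (fun q => decide (w ∈ PySem.Str.split₀ q.2.2))).map (fun q => q.1)).Pairwise (· < ·)) :=
    List.pairwise_map.mpr
      (List.Pairwise.sublist List.filter_sublist (PySem.List.pairwise_lt_enumerate page_texts 0))
  have hnd : ((((PySem.List.enumerate page_texts).filter
      (fun q => decide (w ∈ PySem.Str.split₀ q.2.2))).map (fun q => q.1)).Nodup) :=
    hpw.imp (fun h => ne_of_lt h)
  by_cases h : w ∈ PySem.Str.split₀ page_texts[k].2
  · have hmem : ((k : Int)) ∈ (((PySem.List.enumerate page_texts).filter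
        (fun q => decide (w ∈ PySem.Str.split₀ q.2.2))).map (fun q => q.1)) := by
      refine List.mem_map.mpr ⟨((k : Int), page_texts[k]), List.mem_filter.mpr ⟨?_, by simp [h]⟩, rfl⟩
      exact (PySem.List.mem_enumerate_iff page_texts 0 _).mpr ⟨k, hk, by simp⟩
    rw [List.count_eq_one_of_mem hnd hmem]
    simp [h]
  · have hnm : ((k : Int)) ∉ (((PySem.List.enumerate page_texts).filter
        (fun q => decide (w ∈ PySem.Str.split₀ q.2.2))).map (fun q => q.1)) := by
      intro hm
      obtain ⟨q, hq, hq1⟩ := List.mem_map.mp hm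
      have hqf := List.mem_filter.mp hq
      obtain ⟨m, hm', hqe⟩ := (PySem.List.mem_enumerate_iff page_texts 0 q).mp hqf.1
      subst hqe
      simp only [zero_add] at hq1
      have hmk : m = k := by exact_mod_cast hq1
      subst hmk
      have := hqf.2
      simp [h] at this
    rw [List.count_eq_zero_of_not_mem hnm]
    simp [h]

theorem pv_indicator_sum (cs : List String) (P : String → Prop) [DecidablePred P] :
    (cs.map (fun w => if P w then (1 : Int) else 0)).sum = (cs.countP (fun w => decide (P w)) : Int) := by
  induction cs with
  | nil => simp
  | cons w t ih =>
    by_cases h : P w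
    · simp [h, ih]
      ring
    · simp [h, ih]

-- A's overlap value, characterised as a countP over the chunk's distinct words
theorem pv_overlap_eq (chunk : String) (t : String) :
    PySem.Set.len (PySem.Set.inter (PySem.Set.ofList (PySem.Str.split₀ chunk))
                                   (PySem.Set.ofList (PySem.Str.split₀ t)))
    = ((PySem.List.dedup (PySem.Str.split₀ chunk)).countP
        (fun w => decide (w ∈ PySem.Str.split₀ t)) : Int) := by
  unfold PySem.Set.len PySem.Set.inter
  rw [← List.countP_eq_length_filter]
  congr 1
  exact List.countP_congr (fun x _ => by rw [pv_contains_ofList])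

-- the two selection scans agree when the counted values match A's overlaps
theorem pv_scan_eq (counts : PySem.Dict Int Int) (ov : (Int × String) → Int)
    (l : List (Int × String)) (s : Int) (acc : Int × Int)
    (h : ∀ q ∈ PySem.List.enumerate l s, counts.getD q.1 0 = ov q.2) :
    ((PySem.List.enumerate l s).foldl
      (fun acc q => let c := counts.getD q.1 0; if c > acc.1 then (c, q.2.1) else acc) acc)
    = l.foldl (fun acc p => if ov p > acc.1 then (ov p, p.1) else acc) acc := by
  induction l generalizing s acc with
  | nil => simp [PySem.List.enumerate]
  | cons x t ih =>
    rw [PySem.List.enumerate_cons] at h ⊢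
    simp only [List.foldl_cons]
    rw [h (s, x) (by simp)]
    exact ih (s + 1) _ (fun q hq => h q (by simp [hq]))

-- the counted overlap equals A's overlap at every enumerated page
theorem pv_counts_correct (chunk : String) (page_texts : List (Int × String)) :
    ∀ q ∈ PySem.List.enumerate page_texts, (pvCounts chunk page_texts).getD q.1 0 = pvOv chunk q.2 := by
  intro q hq
  rw [PySem.List.mem_enumerate_iff] at hq
  obtain ⟨k, hk, rfl⟩ := hq
  unfold pvCounts
  rw [pv_counts_getD]
  simp only [PySem.Dict.getD_empty, zero_add, pv_inv_eq, pv_inv_getD]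
  have hcnt : ∀ w : String,
      (((((PySem.List.enumerate page_texts).filter
          (fun q => decide (w ∈ PySem.Str.split₀ q.2.2))).map (fun q => q.1)).count ((k : Int)) : Int))
      = if w ∈ PySem.Str.split₀ page_texts[k].2 then (1 : Int) else 0 := by
    intro w
    rw [pv_count_indicator page_texts w k hk]
    split <;> simp
  simp only [hcnt]
  rw [pv_indicator_sum]
  exact (pv_overlap_eq chunk page_texts[k].2).symm

-- ===== VERDICT (by name: the statement is the Claim_ definition above) =====
theorem find_page_for_chunk_py_spec : Claim_equal_find_page_for_chunk_py := by
  intro chunk page_texts _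
  unfold Spec_find_page_for_chunk_py
  rw [pv_a_eq, pv_alt_eq,
    pv_scan_eq (pvCounts chunk page_texts) (pvOv chunk) page_texts 0 ((0 : Int), (1 : Int))
      (pv_counts_correct chunk page_texts)]
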